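-- pv_equiv track=rewrite | github.com/herbstzachary/Cluedo | GameplayHelpers.py | create_hands
-- ===== SOURCE A (Python) =====
-- def create_hands(card_deck, number_of_players):
--     hands = []
--     each_player_gets = int(len(card_deck) / number_of_players)
--     current_card = 0
--     for _ in range(number_of_players):
--         hand = []
--         for i in range(current_card, current_card + each_player_gets):
--             hand.append(card_deck[i])
--         current_card = current_card + each_player_gets
--         hands.append(hand)
--
--     for i in range(current_card, len(card_deck)):
--         for hand in hands:
--             hand.append(card_deck[i])
--
--     return hands
-- ===== SOURCE B (Python) =====
-- def create_hands(card_deck, number_of_players):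
--     each_player_gets = int(len(card_deck) / number_of_players)
--     leftover = card_deck[each_player_gets * number_of_players:]
--     return [card_deck[p * each_player_gets:(p + 1) * each_player_gets] + leftover
--             for p in range(number_of_players)]
-- ===== Notes on version B (the rewrite author's own statement) =====
-- stated objective: simpler
-- what changed: The per-card index loops and the leftover broadcast loop that mutates every hand are replaced by one list comprehension: each hand is a slice of the deck plus a precomputed leftover tail.
import Mathlib
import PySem

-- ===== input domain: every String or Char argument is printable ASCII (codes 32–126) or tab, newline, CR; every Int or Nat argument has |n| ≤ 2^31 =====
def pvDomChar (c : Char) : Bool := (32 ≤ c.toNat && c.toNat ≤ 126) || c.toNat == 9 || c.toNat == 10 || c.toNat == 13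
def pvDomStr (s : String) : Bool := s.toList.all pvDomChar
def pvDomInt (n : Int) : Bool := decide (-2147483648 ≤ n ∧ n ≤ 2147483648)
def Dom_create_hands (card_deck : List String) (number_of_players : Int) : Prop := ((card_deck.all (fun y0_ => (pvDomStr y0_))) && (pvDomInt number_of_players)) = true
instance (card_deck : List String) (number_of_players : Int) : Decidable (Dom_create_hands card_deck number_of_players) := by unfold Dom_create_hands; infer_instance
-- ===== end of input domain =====

-- B replaces A's per-card index loops and the leftover broadcast loop (which mutates every hand)
-- by one comprehension: each hand = a deck slice plus one precomputed leftover tail. Objective: simpler.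

-- ===== PORT A =====
-- int(len/players): Python's float division then int() truncates toward zero; on this domain
-- (|len|, |players| ≤ 2^31 < 2^53) it is exactly PySem.Int.truncdiv.
def create_hands (card_deck : List String) (number_of_players : Int) : List (List String) :=
  let each_player_gets : Int := PySem.Int.truncdiv (card_deck.length : Int) number_of_players
  let st :=
    (PySem.List.pyRange 0 number_of_players 1).foldl
      (fun (st : List (List String) × Int) _ =>
        let hand :=
          (PySem.List.pyRange st.2 (st.2 + each_player_gets) 1).foldl
            (fun hand i => hand ++ [PySem.List.pyGetD card_deck i ""]) []
        (st.1 ++ [hand], st.2 + each_player_gets))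
      ([], 0)
  (PySem.List.pyRange st.2 (card_deck.length : Int) 1).foldl
    (fun hands i => hands.map (fun hand => hand ++ [PySem.List.pyGetD card_deck i ""]))
    st.1

-- ===== PORT B =====
def create_hands_alt (card_deck : List String) (number_of_players : Int) : List (List String) :=
  let each_player_gets : Int := PySem.Int.truncdiv (card_deck.length : Int) number_of_players
  let leftover := PySem.List.slice card_deck (some (each_player_gets * number_of_players)) none
  (PySem.List.pyRange 0 number_of_players 1).map
    (fun p => PySem.List.slice card_deck (some (p * each_player_gets)) (some ((p + 1) * each_player_gets)) ++ leftover)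

-- ===== PRECONDITION & SPEC =====
-- number_of_players = 0 makes A raise ZeroDivisionError; that is all Pre_ excludes.
def Pre_create_hands (card_deck : List String) (number_of_players : Int) : Prop :=
  number_of_players ≠ 0
instance (card_deck : List String) (number_of_players : Int) : Decidable (Pre_create_hands card_deck number_of_players) := by unfold Pre_create_hands; infer_instance

def pvWitness_create_hands : List String × Int := (["a", "b", "c", "d", "e"], 2)

def Spec_create_hands (card_deck : List String) (number_of_players : Int) (out : List (List String)) : Prop := out = create_hands_alt card_deck number_of_players
instance (card_deck : List String) (number_of_players : Int) (out : List (List String)) : Decidable (Spec_create_hands card_deck number_of_players out) := by unfold Spec_create_hands; infer_instance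

-- ===== CLAIM (what is proved, stated in full; the proofs are below) =====
def Claim_equal_create_hands : Prop := ∀ (card_deck : List String) (number_of_players : Int), Dom_create_hands card_deck number_of_players → Pre_create_hands card_deck number_of_players → Spec_create_hands card_deck number_of_players (create_hands card_deck number_of_players)

-- ===== LEMMAS AND PROOFS =====

-- A's leftover broadcast loop: appending card g i to every hand, for each i of l in turn,
-- appends l.map g to every hand.
theorem foldl_broadcast (l : List Int) (g : Int → String) (hs0 : List (List String)) :
    l.foldl (fun hands i => hands.map (fun hand => hand ++ [g i])) hs0
      = hs0.map (fun hand => hand ++ l.map g) := by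
  induction l generalizing hs0 with
  | nil => simp
  | cons a l ih =>
    simp only [List.foldl_cons, ih, List.map_map, List.map_cons]
    exact List.map_congr_left (fun h _ => by simp)

-- A's dealing loop invariant: starting from (hs, c), after l.length iterations the hands are
-- hs extended by one indexed segment per iteration and the cursor has advanced l.length * each.
theorem foldl_deal (l : List Int) (card_deck : List String) (each c : Int) (hs : List (List String)) :
    l.foldl
      (fun (st : List (List String) × Int) _ =>
        let hand :=
          (PySem.List.pyRange st.2 (st.2 + each) 1).foldl
            (fun hand i => hand ++ [PySem.List.pyGetD card_deck i ""]) []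
        (st.1 ++ [hand], st.2 + each))
      (hs, c)
    = (hs ++ (List.range l.length).map
          (fun (p : Nat) => (PySem.List.pyRange (c + (p : Int) * each) (c + (p : Int) * each + each) 1).map
            (fun i => PySem.List.pyGetD card_deck i "")),
       c + (l.length : Int) * each) := by
  induction l generalizing hs c with
  | nil => simp
  | cons a l ih =>
    simp only [List.foldl_cons, ih, List.length_cons]
    rw [PySem.List.foldl_append_singleton_eq_map]
    simp only [Prod.mk.injEq]
    refine ⟨?_, ?_⟩
    · rw [List.append_assoc]
      congr 1
      rw [List.range_succ_eq_map, List.map_cons, List.map_map, List.singleton_append]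
      congr 1
      · norm_num
      · exact List.map_congr_left (fun p _ => by
          simp only [Function.comp, Nat.succ_eq_add_one]
          congr 2 <;> push_cast <;> ring)
    · push_cast; ring

-- a gather of in-range indices [c, c+e) is the corresponding drop/take segment
theorem gather_segment (card_deck : List String) (c e : Nat) (h : c + e ≤ card_deck.length) :
    (PySem.List.pyRange (c : Int) ((c : Int) + (e : Int)) 1).map
        (fun i => PySem.List.pyGetD card_deck i "")
      = (card_deck.drop c).take e := by
  have hsplit := PySem.List.pyRange_one_append (c : Int) ((c : Int) + (e : Int))
      (card_deck.length : Int) (by omega) (by exact_mod_cast h)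
  have hfull := PySem.List.map_pyGetD_pyRange' card_deck "" (a := (c : Int)) (by omega)
  rw [hsplit, List.map_append] at hfull
  have hlen : ((PySem.List.pyRange (c : Int) ((c : Int) + (e : Int)) 1).map
      (fun i => PySem.List.pyGetD card_deck i "")).length = e := by
    rw [List.length_map, PySem.List.length_pyRange_one]; omega
  rw [Int.toNat_natCast] at hfull
  rw [← hfull]
  exact (List.take_left' hlen).symm

theorem create_hands_spec : Claim_equal_create_hands := by
  intro card_deck number_of_players _ hpre
  unfold Spec_create_hands create_hands create_hands_alt
  rcases lt_trichotomy number_of_players 0 with hneg | hzero | hpos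
  · -- no players: range(n) is empty, A builds no hands and broadcasts into none; B maps over nothing
    rw [PySem.List.pyRange_one_eq_nil (by omega)]
    simp [foldl_broadcast]
  · exact absurd hzero hpre
  · -- positive players
    set L := card_deck.length with hL
    set N := number_of_players.toNat with hN
    have hNn : (N : Int) = number_of_players := Int.toNat_of_nonneg (by omega)
    set e := L / N with he
    have heach : PySem.Int.truncdiv (L : Int) number_of_players = (e : Int) := by
      rw [← hNn]; simp [PySem.Int.truncdiv, he]
    have hNe : N * e ≤ L := by
      rw [he, Nat.mul_comm]
      exact Nat.div_mul_le_self L N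
    simp only [heach]
    rw [foldl_deal, PySem.List.length_pyRange_one]
    have hlen' : (number_of_players - 0).toNat = N := by omega
    rw [hlen']
    simp only [List.nil_append, zero_add]
    rw [foldl_broadcast, List.map_map]
    -- the leftover tail
    have htail : (PySem.List.pyRange ((N : Int) * (e : Int)) (L : Int) 1).map
        (fun i => PySem.List.pyGetD card_deck i "") = card_deck.drop (N * e) := by
      have hcast : ((N : Int) * (e : Int)) = ((N * e : Nat) : Int) := by push_cast; ring
      rw [hcast]
      have := PySem.List.map_pyGetD_pyRange' card_deck "" (a := ((N * e : Nat) : Int)) (by omega)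
      rw [Int.toNat_natCast] at this
      exact this
    rw [htail, ← hNn]
    have hEN : (e : Int) * (N : Int) = ((N * e : Nat) : Int) := by push_cast; ring
    rw [hEN, PySem.List.slice_from card_deck (by omega), Int.toNat_natCast,
        PySem.List.pyRange_zero_nat, List.map_map]
    refine List.map_congr_left (fun p hp => ?_)
    have hpN : p < N := List.mem_range.mp hp
    have hbound : p * e + e ≤ card_deck.length := by
      have h1 : p * e + e ≤ N * e := by nlinarith
      omega
    simp only [Function.comp]
    congr 1
    rw [show (((p : Nat) : Int) + 1) * (e : Int) = ((p * e : Nat) : Int) + ((e : Nat) : Int) by push_cast; ring,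
        show ((p : Nat) : Int) * (e : Int) = ((p * e : Nat) : Int) by push_cast; ring,
        PySem.List.slice_natCast_add card_deck (p * e) e,
        ← gather_segment card_deck (p * e) e hbound]
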